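-- pv_equiv track=rewrite | github.com/Gnoyh/devcourse_practice | dp_2_1_3.py | solution
-- ===== SOURCE A (Python) =====
-- def solution(L, x):
--     result = []
--
--     if x in L:
--         for i in range(len(L)):
--             if L[i] == x:
--                 result.append(i)
--     else:
--         result.append(-1)
--
--     return result
-- ===== SOURCE B (Python) =====
-- def solution(L, x):
--     idx = {}
--     for i, v in enumerate(L):
--         idx.setdefault(v, []).append(i)
--     return idx.get(x, [-1])
-- ===== Notes on version B (the rewrite author's own statement) =====
-- stated objective: alternative
-- what changed: Replaces A's membership scan plus index loop with a single pass that groups indices by value into a dict, the answer then being a plain dict lookup with [-1] as default.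
import Mathlib
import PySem

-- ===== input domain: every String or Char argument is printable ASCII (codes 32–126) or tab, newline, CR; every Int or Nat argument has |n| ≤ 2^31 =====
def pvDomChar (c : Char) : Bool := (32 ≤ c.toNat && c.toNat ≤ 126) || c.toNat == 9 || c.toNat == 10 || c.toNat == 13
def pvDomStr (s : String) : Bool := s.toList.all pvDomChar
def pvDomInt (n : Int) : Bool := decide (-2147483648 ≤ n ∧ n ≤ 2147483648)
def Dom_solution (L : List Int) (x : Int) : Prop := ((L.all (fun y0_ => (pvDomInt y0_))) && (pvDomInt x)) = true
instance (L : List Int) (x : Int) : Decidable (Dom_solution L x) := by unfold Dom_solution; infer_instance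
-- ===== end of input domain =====

-- B replaces A's membership scan + index loop with one pass grouping indices by value into a dict, then a lookup with [-1] default; objective: alternative (same O(n) cost).


-- ===== PORT A =====
-- literal port of A: membership test, then an index loop over range(len(L))
def solution (L : List Int) (x : Int) : List Int :=
  if x ∈ L then
    (PySem.List.pyRange 0 (L.length : Int) 1).foldl
      (fun result i => if PySem.List.pyGetD L i 0 = x then result ++ [i] else result) []
  else [-1]

-- ===== PORT B =====
-- port of B: one pass over enumerate(L) grouping indices by value into a dict
-- (idx.setdefault(v, []).append(i) = modify v [] (· ++ [i])), then idx.get(x, [-1])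
def solution_alt (L : List Int) (x : Int) : List Int :=
  ((PySem.List.enumerate L 0).foldl
    (fun d p => d.modify p.2 ([] : List Int) (fun l => l ++ [p.1])) PySem.Dict.empty).getD x [-1]

-- ===== PRECONDITION & SPEC =====
def Spec_solution (L : List Int) (x : Int) (out : List Int) : Prop := out = solution_alt L x
instance (L : List Int) (x : Int) (out : List Int) : Decidable (Spec_solution L x out) := by unfold Spec_solution; infer_instance

-- ===== CLAIM =====
def Claim_equal_solution : Prop := ∀ (L : List Int) (x : Int), Dom_solution L x → Spec_solution L x (solution L x)

-- ===== LEMMAS AND PROOFS =====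

-- the dict built by B, as a fold over swapped (value, index) pairs
theorem build_eq (L : List Int) :
    (PySem.List.enumerate L 0).foldl
      (fun d p => d.modify p.2 ([] : List Int) (fun l => l ++ [p.1])) PySem.Dict.empty
    = ((PySem.List.enumerate L 0).map (fun p => (p.2, p.1))).foldl
      (fun d p => d.modify p.1 ([] : List Int) (fun l => l ++ [p.2])) PySem.Dict.empty := by
  rw [List.foldl_map]

theorem getD_build (L : List Int) (x : Int) :
    ((PySem.List.enumerate L 0).foldl
      (fun d p => d.modify p.2 ([] : List Int) (fun l => l ++ [p.1])) PySem.Dict.empty).getD x []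
    = ((PySem.List.enumerate L 0).filter (fun p => p.2 == x)).map (·.1) := by
  rw [build_eq, PySem.Dict.getD_foldl_modify_append]
  simp [List.filter_map, Function.comp_def]

theorem contains_build (L : List Int) (x : Int) :
    ((PySem.List.enumerate L 0).foldl
      (fun d p => d.modify p.2 ([] : List Int) (fun l => l ++ [p.1])) PySem.Dict.empty).contains x
    = decide (x ∈ L) := by
  rw [PySem.Dict.contains_eq_decide_mem_keys, PySem.Dict.keys_foldl_modify_key]
  simp [PySem.Set.mem_update, PySem.List.map_snd_enumerate]

-- A's index loop is the same filtered index list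
theorem indices_eq (L : List Int) (x : Int) :
    (PySem.List.pyRange 0 (L.length : Int) 1).foldl
      (fun result i => if PySem.List.pyGetD L i 0 = x then result ++ [i] else result) []
    = ((PySem.List.enumerate L 0).filter (fun p => p.2 == x)).map (·.1) := by
  rw [PySem.List.foldl_append_ite_eq_filter, PySem.List.enumerate_eq_map_pyRange L 0,
    List.filter_map, List.map_map]
  simp [Function.comp_def]
  exact List.filter_congr (fun i _ => by rw [Bool.eq_iff_iff]; simp)

-- ===== VERDICT =====
theorem solution_spec : Claim_equal_solution := by
  intro L x _
  unfold Spec_solution solution solution_alt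
  by_cases hmem : x ∈ L
  · rw [if_pos hmem, indices_eq]
    have hc : ((PySem.List.enumerate L 0).foldl
        (fun d p => d.modify p.2 ([] : List Int) (fun l => l ++ [p.1])) PySem.Dict.empty).contains x
        = true := by rw [contains_build]; exact decide_eq_true hmem
    have hsome : (((PySem.List.enumerate L 0).foldl
        (fun d p => d.modify p.2 ([] : List Int) (fun l => l ++ [p.1])) PySem.Dict.empty).get? x).isSome := by
      rw [← PySem.Dict.contains_eq_isSome_get?]; exact hc
    obtain ⟨v, hv⟩ := Option.isSome_iff_exists.mp hsome
    have e1 : ((PySem.List.enumerate L 0).foldl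
        (fun d p => d.modify p.2 ([] : List Int) (fun l => l ++ [p.1])) PySem.Dict.empty).getD x [-1] = v := by
      rw [PySem.Dict.getD_eq_get?_getD, hv]; rfl
    have e2 : ((PySem.List.enumerate L 0).foldl
        (fun d p => d.modify p.2 ([] : List Int) (fun l => l ++ [p.1])) PySem.Dict.empty).getD x [] = v := by
      rw [PySem.Dict.getD_eq_get?_getD, hv]; rfl
    rw [e1, ← e2, getD_build]
  · rw [if_neg hmem, PySem.Dict.getD_of_not_contains]
    rw [contains_build, decide_eq_false hmem]
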